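-- pv_equiv track=rewrite | github.com/ncu-psl/MasonPy | Wind Turbine Control System(project)/project(version1.4)/Mode.py | getMargin
-- ===== SOURCE A (Python) =====
-- def getMargin(index, domainlist):
--     indexleft  = 0
--     indexright = 0
--     if index < domainlist[0]:
--         indexleft  = 0
--         indexright = 1
--     elif index > domainlist[len(domainlist)-1]:
--         indexleft  = len(domainlist)-2
--         indexright = len(domainlist)-1
--     else:
--         for i in range(0,len(domainlist)-1):
--             if index == domainlist[i]:
--                 indexleft  = i
--                 indexright = i
--                 break;
--             if index > domainlist[i] and index < domainlist[i+1]: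
--                 indexleft  = i
--                 indexright = i+1
--                 break;
--         if index == domainlist[len(domainlist)-1]:
--             indexleft  = len(domainlist)-1
--             indexright = len(domainlist)-1
--     return indexleft, indexright
-- ===== SOURCE B (Python) =====
-- def getMargin(index, domainlist):
--     n = len(domainlist)
--     if index < domainlist[0]:
--         return 0, 1
--     if index > domainlist[n - 1]:
--         return n - 2, n - 1
--     if index == domainlist[n - 1]:
--         return n - 1, n - 1
--     # bisect_left: leftmost position lo with domainlist[lo] >= index
--     lo, hi = 0, n - 1
--     while lo < hi:
--         mid = (lo + hi) // 2
--         if domainlist[mid] < index: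
--             lo = mid + 1
--         else:
--             hi = mid
--     if domainlist[lo] == index:
--         return lo, lo
--     return lo - 1, lo
-- ===== Notes on version B (the rewrite author's own statement) =====
-- stated objective: faster
-- what changed: A's linear scan over adjacent pairs is replaced by a hand-written bisect_left binary search for the leftmost element >= index; Pre_ keeps every input answered from the endpoints alone and otherwise restricts to sorted (non-decreasing) domainlists, the function's natural domain, since on an unsorted interior A's pair is an artefact of scan order.
-- outside the precondition, e.g. on getMargin(2, [0, 5, 1, 1, 1, 1, 3]): A returns (0, 1), B returns (5, 6); on getMargin(2, []): A raises IndexError, B raises IndexError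
import Mathlib
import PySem

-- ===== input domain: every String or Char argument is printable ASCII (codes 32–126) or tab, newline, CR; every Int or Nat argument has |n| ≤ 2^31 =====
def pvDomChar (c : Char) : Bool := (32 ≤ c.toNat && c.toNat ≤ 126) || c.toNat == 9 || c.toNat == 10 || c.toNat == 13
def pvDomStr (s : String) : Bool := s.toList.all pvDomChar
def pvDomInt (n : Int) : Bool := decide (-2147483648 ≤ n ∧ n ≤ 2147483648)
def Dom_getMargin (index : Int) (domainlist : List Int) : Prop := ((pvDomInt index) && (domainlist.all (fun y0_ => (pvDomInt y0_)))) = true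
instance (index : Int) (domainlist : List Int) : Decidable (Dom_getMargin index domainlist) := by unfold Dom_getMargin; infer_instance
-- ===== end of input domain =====

-- B replaces A's linear scan over adjacent pairs by a bisect_left binary search over the sorted
-- domainlist (O(log n) vs O(n) on the sorted domain Pre_ states).


-- ===== PORT A =====
-- A's for-loop with break: first index i in the range where one of the two conditions fires
def getMarginLoopA (index : Int) (domainlist : List Int) : List Int → Option (Int × Int)
  | [] => none
  | i :: rest =>
    if index = PySem.List.pyGetD domainlist i 0 then some (i, i)
    else if PySem.List.pyGetD domainlist i 0 < index ∧ index < PySem.List.pyGetD domainlist (i + 1) 0 then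
      some (i, i + 1)
    else getMarginLoopA index domainlist rest

def getMargin (index : Int) (domainlist : List Int) : List Int :=
  let n : Int := PySem.List.len domainlist
  if index < PySem.List.pyGetD domainlist 0 0 then [0, 1]
  else if PySem.List.pyGetD domainlist (n - 1) 0 < index then [n - 2, n - 1]
  else
    let p : Int × Int :=
      match getMarginLoopA index domainlist (PySem.List.pyRange 0 (n - 1) 1) with
      | some q => q
      | none => (0, 0)
    let p : Int × Int := if index = PySem.List.pyGetD domainlist (n - 1) 0 then (n - 1, n - 1) else p
    [p.1, p.2]

-- ===== PORT B =====
-- B's while-loop (bisect_left): lo and hi are nonnegative throughout in Source B, so Python's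
-- (lo+hi)//2 is exactly Nat division here; list indices are in range wherever the loop reads them.
def bisectLeftB (index : Int) (domainlist : List Int) (lo hi : Nat) : Nat :=
  if lo < hi then
    let mid := (lo + hi) / 2
    if PySem.List.pyGetD domainlist (mid : Int) 0 < index then bisectLeftB index domainlist (mid + 1) hi
    else bisectLeftB index domainlist lo mid
  else lo
termination_by hi - lo
decreasing_by all_goals omega

def getMargin_alt (index : Int) (domainlist : List Int) : List Int :=
  let n : Int := PySem.List.len domainlist
  if index < PySem.List.pyGetD domainlist 0 0 then [0, 1]
  else if PySem.List.pyGetD domainlist (n - 1) 0 < index then [n - 2, n - 1]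
  else if index = PySem.List.pyGetD domainlist (n - 1) 0 then [n - 1, n - 1]
  else
    let lo := bisectLeftB index domainlist 0 (domainlist.length - 1)
    if PySem.List.pyGetD domainlist (lo : Int) 0 = index then [(lo : Int), (lo : Int)]
    else [(lo : Int) - 1, (lo : Int)]

-- ===== PRECONDITION & SPEC =====
-- Pre_ excludes the empty list, on which A (domainlist[0]) raises IndexError, and unsorted
-- domainlists whose interior the index falls into (index within [domainlist[0], domainlist[-1])):
-- the function's purpose is bracketing in a sorted list, and there A's pair is an artefact of its
-- left-to-right scan order that a binary search cannot share; when index is below domainlist[0]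
-- or at/above domainlist[-1] both programs answer from the endpoints alone, so those inputs stay in.
def Pre_getMargin (index : Int) (domainlist : List Int) : Prop :=
  domainlist ≠ [] ∧ (domainlist.Pairwise (· ≤ ·) ∨
    index < PySem.List.pyGetD domainlist 0 0 ∨ PySem.List.pyGetD domainlist (-1) 0 ≤ index)
instance (index : Int) (domainlist : List Int) : Decidable (Pre_getMargin index domainlist) := by
  unfold Pre_getMargin; infer_instance

def pvWitness_getMargin : Int × List Int := (2, [1, 3, 5])

def Spec_getMargin (index : Int) (domainlist : List Int) (out : List Int) : Prop := out = getMargin_alt index domainlist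
instance (index : Int) (domainlist : List Int) (out : List Int) : Decidable (Spec_getMargin index domainlist out) := by unfold Spec_getMargin; infer_instance

-- ===== CLAIM (what is proved, stated in full; the proofs are below) =====
def Claim_equal_getMargin : Prop := ∀ (index : Int) (domainlist : List Int), Dom_getMargin index domainlist → Pre_getMargin index domainlist → Spec_getMargin index domainlist (getMargin index domainlist)

-- ===== LEMMAS AND PROOFS =====

-- bisect invariant: on a sorted list, starting from lo/hi with everything left of lo < index and
-- index ≤ dl[hi], the search returns the leftmost r with index ≤ dl[r]
lemma bisect_spec (index : Int) (dl : List Int) (hs : dl.Pairwise (· ≤ ·)) :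
    ∀ (d lo hi : Nat), hi - lo ≤ d → lo ≤ hi → (hhi : hi < dl.length) →
    (∀ k (hk : k < dl.length), k < lo → dl[k] < index) → index ≤ dl[hi] →
    ∃ (r : Nat) (hr : r < dl.length), bisectLeftB index dl lo hi = r ∧ lo ≤ r ∧ r ≤ hi ∧
      (∀ k (hk : k < dl.length), k < r → dl[k] < index) ∧ index ≤ dl[r] := by
  intro d
  induction d with
  | zero =>
    intro lo hi hd hlh hhi hlow hup
    have : lo = hi := by omega
    subst this
    exact ⟨lo, hhi, by unfold bisectLeftB; simp, le_refl _, le_refl _, hlow, hup⟩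
  | succ d ih =>
    intro lo hi hd hlh hhi hlow hup
    by_cases h : lo < hi
    · have hmid : (lo + hi) / 2 < dl.length := by omega
      rw [show bisectLeftB index dl lo hi =
          (if PySem.List.pyGetD dl (((lo + hi) / 2 : Nat) : Int) 0 < index then
            bisectLeftB index dl ((lo + hi) / 2 + 1) hi
          else bisectLeftB index dl lo ((lo + hi) / 2)) from by
        conv_lhs => rw [bisectLeftB]
        simp [h]]
      rw [PySem.List.pyGetD_eq_getElem _ _ (by positivity) (by exact_mod_cast hmid)]
      simp only [Int.toNat_natCast]
      split_ifs with hcmp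
      · -- dl[mid] < index : everything up to mid is < index by sortedness
        have hlow' : ∀ k (hk : k < dl.length), k < (lo + hi) / 2 + 1 → dl[k] < index := by
          intro k hk hklt
          rcases Nat.lt_or_ge k ((lo + hi) / 2) with hk' | hk'
          · exact lt_of_le_of_lt
              ((List.pairwise_iff_getElem.mp hs) k ((lo + hi) / 2) hk hmid hk') hcmp
          · have : k = (lo + hi) / 2 := by omega
            subst this; exact hcmp
        obtain ⟨r, hr, e1, e2, e3, e4, e5⟩ :=
          ih ((lo + hi) / 2 + 1) hi (by omega) (by omega) hhi hlow' hup
        exact ⟨r, hr, e1, by omega, e3, e4, e5⟩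
      · obtain ⟨r, hr, e1, e2, e3, e4, e5⟩ :=
          ih lo ((lo + hi) / 2) (by omega) (by omega) hmid hlow (not_lt.mp hcmp)
        exact ⟨r, hr, e1, e2, by omega, e4, e5⟩
    · have : lo = hi := by omega
      subst this
      exact ⟨lo, hhi, by unfold bisectLeftB; simp, le_refl _, le_refl _, hlow, hup⟩

-- A's loop finds the first index where a condition fires: if every position in [a, tgt) fails both
-- tests and position tgt passes one, the loop from a returns tgt's pair
lemma loopA_finds (index : Int) (dl : List Int) (tgt : Nat) (htgt : tgt + 1 < dl.length)
    (hhit : dl[tgt] = index ∨ (dl[tgt] < index ∧ index < dl[tgt + 1])) :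
    ∀ (d a : Nat), tgt - a ≤ d → a ≤ tgt →
    (∀ k (hk : k + 1 < dl.length), a ≤ k → k < tgt →
      ¬ dl[k] = index ∧ ¬ (dl[k] < index ∧ index < dl[k + 1])) →
    getMarginLoopA index dl (PySem.List.pyRange (a : Int) ((dl.length : Int) - 1) 1) =
      if dl[tgt] = index then some ((tgt : Int), (tgt : Int)) else some ((tgt : Int), (tgt : Int) + 1) := by
  intro d
  induction d with
  | zero =>
    intro a hd ha hfail
    have haeq : a = tgt := by omega
    subst haeq
    rw [PySem.List.pyRange_one_cons (by omega)]
    unfold getMarginLoopA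
    rw [PySem.List.pyGetD_eq_getElem _ _ (by positivity) (by omega),
        PySem.List.pyGetD_eq_getElem _ _ (by positivity) (by omega)]
    simp only [Int.toNat_natCast, show ((a : Int) + 1).toNat = a + 1 from by omega]
    rcases hhit with he | hb
    · rw [if_pos he.symm, if_pos he]
    · rw [if_neg (fun hh => absurd hh.symm (by omega : ¬ dl[a] = index)), if_pos hb,
          if_neg (by omega : ¬ dl[a] = index)]
  | succ d ih =>
    intro a hd ha hfail
    by_cases h : a = tgt
    · subst h
      rw [PySem.List.pyRange_one_cons (by omega)]
      unfold getMarginLoopA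
      rw [PySem.List.pyGetD_eq_getElem _ _ (by positivity) (by omega),
          PySem.List.pyGetD_eq_getElem _ _ (by positivity) (by omega)]
      simp only [Int.toNat_natCast, show ((a : Int) + 1).toNat = a + 1 from by omega]
      rcases hhit with he | hb
      · rw [if_pos he.symm, if_pos he]
      · rw [if_neg (fun hh => absurd hh.symm (by omega : ¬ dl[a] = index)), if_pos hb,
            if_neg (by omega : ¬ dl[a] = index)]
    · have ha' : a < tgt := by omega
      obtain ⟨hne, hnb⟩ := hfail a (by omega) (le_refl _) ha'
      rw [PySem.List.pyRange_one_cons (by omega)]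
      unfold getMarginLoopA
      rw [PySem.List.pyGetD_eq_getElem _ _ (by positivity) (by omega),
          PySem.List.pyGetD_eq_getElem _ _ (by positivity) (by omega)]
      simp only [Int.toNat_natCast, show ((a : Int) + 1).toNat = a + 1 from by omega]
      rw [if_neg (fun hh => hne hh.symm), if_neg hnb]
      have := ih (a + 1) (by omega) (by omega)
        (fun k hk hak hkt => hfail k hk (by omega) hkt)
      rw [show ((a : Int) + 1) = ((a + 1 : Nat) : Int) from by push_cast; ring]
      exact this

-- ===== VERDICT (by name: the statement is the Claim_ definition above) =====
theorem getMargin_spec : Claim_equal_getMargin := by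
  intro index dl _ hpre
  obtain ⟨hne, hdisj⟩ := hpre
  have hn : 0 < dl.length := List.length_pos_iff.mpr hne
  unfold Spec_getMargin getMargin getMargin_alt
  simp only [PySem.List.len_eq]
  by_cases c1 : index < PySem.List.pyGetD dl 0 0
  · rw [if_pos c1, if_pos c1]
  · rw [if_neg c1, if_neg c1]
    by_cases c2 : PySem.List.pyGetD dl ((dl.length : Int) - 1) 0 < index
    · rw [if_pos c2, if_pos c2]
    · rw [if_neg c2, if_neg c2]
      by_cases c3 : index = PySem.List.pyGetD dl ((dl.length : Int) - 1) 0
      · rw [if_pos c3, if_pos c3]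
      · rw [if_neg c3, if_neg c3]
        -- case 4: dl[0] ≤ index < dl[n-1], hence n ≥ 2
        rw [PySem.List.pyGetD_eq_getElem _ _ (by omega) (by omega)] at c1
        rw [PySem.List.pyGetD_eq_getElem _ _ (by omega) (by omega)] at c2
        rw [PySem.List.pyGetD_eq_getElem _ _ (by omega) (by omega)] at c3
        simp only [Int.toNat_zero, show ((dl.length : Int) - 1).toNat = dl.length - 1 from by omega]
          at c1 c2 c3
        have h0 : dl[0] ≤ index := not_lt.mp c1
        have hlast : index < dl[dl.length - 1] :=
          lt_of_le_of_ne (not_lt.mp c2) c3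
        have hs : dl.Pairwise (· ≤ ·) := by
          rcases hdisj with hs | hlt | hge
          · exact hs
          · rw [PySem.List.pyGetD_eq_getElem _ _ (by omega) (by omega)] at hlt
            simp only [Int.toNat_zero] at hlt
            omega
          · rw [PySem.List.pyGetD_neg_one dl 0 hne, List.getLast_eq_getElem] at hge
            omega
        have hn2 : 2 ≤ dl.length := by
          by_contra hc
          have h1 : dl.length = 1 := by omega
          have : dl[0] = dl[dl.length - 1] := by congr 1; omega
          omega
        obtain ⟨r, hrlen, hreq, hr0, hrhi, hrlow, hrup⟩ :=
          bisect_spec index dl hs (dl.length - 1) 0 (dl.length - 1) (by omega) (by omega)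
            (by omega) (by omega) hlast.le
        rw [hreq, PySem.List.pyGetD_eq_getElem _ _ (by positivity) (by omega)]
        simp only [Int.toNat_natCast]
        by_cases heq : dl[r] = index
        · -- equality hit at r; r < n - 1 since dl[r] = index < dl[n-1]
          have hrlt : r + 1 < dl.length := by
            rcases Nat.lt_or_ge (r + 1) dl.length with h | h
            · exact h
            · exfalso; have : r = dl.length - 1 := by omega
              subst this; omega
          have hloop := loopA_finds index dl r hrlt (Or.inl heq) r 0 (by omega) (by omega)
            (fun k hk h0k hkr => ⟨by have := hrlow k (by omega) hkr; omega,
              fun hb => by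
                rcases Nat.lt_or_ge (k + 1) r with hlt | hge
                · have := hrlow (k + 1) (by omega) hlt; omega
                · have hkr1 : dl[k + 1]'(by omega) = dl[r] := by congr 1; omega
                  omega⟩)
          rw [if_pos heq] at hloop
          simp only [Nat.cast_zero] at hloop
          rw [hloop, if_pos heq]
        · -- dl[r] > index: A's first hit is the bracket at r - 1
          have hgt : index < dl[r] := lt_of_le_of_ne hrup (fun h => heq h.symm)
          have hr1 : 1 ≤ r := by
            by_contra hc
            have : r = 0 := by omega
            subst this; omega
          have hprev : dl[r - 1] < index := hrlow (r - 1) (by omega) (by omega)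
          have hbr : dl[(r - 1)]'(by omega) < index ∧ index < dl[(r - 1) + 1]'(by omega) := by
            refine ⟨hprev, ?_⟩
            rw [show dl[(r - 1) + 1]'(by omega) = dl[r] from by congr 1; omega]
            exact hgt
          have hloop := loopA_finds index dl (r - 1) (by omega) (Or.inr hbr) (r - 1) 0 (by omega)
            (by omega)
            (fun k hk h0k hkr => ⟨by have := hrlow k (by omega) (by omega); omega,
              fun hb => by have := hrlow (k + 1) (by omega) (by omega); omega⟩)
          rw [if_neg (show ¬ dl[r - 1]'(by omega) = index from by omega)] at hloop
          simp only [Nat.cast_zero] at hloop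
          rw [hloop, if_neg heq]
          have e1 : ((r - 1 : Nat) : Int) = (r : Int) - 1 := by omega
          have e2 : ((r - 1 : Nat) : Int) + 1 = (r : Int) := by omega
          show [((r - 1 : Nat) : Int), ((r - 1 : Nat) : Int) + 1] = [(r : Int) - 1, (r : Int)]
          rw [e2, e1]
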